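-- pv_equiv track=rewrite | github.com/loridy/HKU-FYP | fyp_finance_ml_v2/src/config.py | generate_feature_set_combinations
-- ===== SOURCE A (Python) =====
-- from typing import Dict, List
--
-- def generate_feature_set_combinations(feature_groups: List[str]) -> Dict[str, List[str]]:
--     """Generate all non-empty combinations of feature groups.
--
--     Example groups:
--       ["momentum", "reversal", "volatility", "liquidity", "cross_sectional", "macro", "fundamental"]
--
--     Returns a dict mapping a stable name -> list of groups (in the same order as `feature_groups`).
--
--     Note: This produces 2^N - 1 combinations (N=7 => 127 feature sets).
--     """
--     combos: Dict[str, List[str]] = {}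
--     n = len(feature_groups)
--     # bitmask from 1..(2^n - 1)
--     for mask in range(1, 2**n):
--         groups = [feature_groups[i] for i in range(n) if (mask >> i) & 1]
--         # stable, readable name
--         name = "FS_" + "_".join(groups)
--         combos[name] = groups
--     return combos
-- ===== SOURCE B (Python) =====
-- def generate_feature_set_combinations(feature_groups):
--     """Generate all non-empty combinations of feature groups by growing the
--     powerset incrementally (doubling per group) instead of bitmask enumeration."""
--     subsets = [[]]
--     for g in feature_groups:
--         subsets = subsets + [sub + [g] for sub in subsets]
--     combos = {}
--     for sub in subsets:
--         if sub:
--             combos["FS_" + "_".join(sub)] = sub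
--     return combos
-- ===== Notes on version B (the rewrite author's own statement) =====
-- stated objective: alternative
-- what changed: Replaces bitmask enumeration (2^n masks, each scanned with an inner index loop over all n positions) by an incremental powerset that doubles a list of subsets once per group, so no per-subset bit-testing loop remains.
import Mathlib
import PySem

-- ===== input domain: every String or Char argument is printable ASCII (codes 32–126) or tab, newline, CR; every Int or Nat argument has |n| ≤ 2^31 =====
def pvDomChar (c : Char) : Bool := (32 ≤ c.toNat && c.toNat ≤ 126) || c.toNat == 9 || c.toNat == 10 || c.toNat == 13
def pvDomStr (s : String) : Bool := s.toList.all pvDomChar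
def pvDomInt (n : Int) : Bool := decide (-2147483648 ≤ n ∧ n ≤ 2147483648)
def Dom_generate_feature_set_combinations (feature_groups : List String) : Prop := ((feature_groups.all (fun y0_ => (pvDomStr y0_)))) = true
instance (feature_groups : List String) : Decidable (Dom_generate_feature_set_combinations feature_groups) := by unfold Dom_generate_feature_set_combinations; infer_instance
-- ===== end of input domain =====

-- B replaces A's bitmask enumeration by an incremental powerset (doubling a subset list
-- per group); same return value (return-value equivalence; neither mutates its argument).

-- ===== PORT A =====
-- A's inner comprehension: groups = [feature_groups[i] for i in range(n) if (mask >> i) & 1]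
def pvGroupsA (feature_groups : List String) (mask : Int) : List String :=
  (PySem.List.pyRange 0 (PySem.List.len feature_groups) 1).foldl
    (fun acc i => if PySem.Int.band (mask >>> i.toNat) 1 = 1
      then acc ++ [PySem.List.pyGetD feature_groups i ""] else acc) []

-- literal port of A: for mask in range(1, 2**n): combos["FS_" + "_".join(groups)] = groups
def generate_feature_set_combinations (feature_groups : List String) : List (String × List String) :=
  ((PySem.List.pyRange 1 ((2 : Int) ^ (PySem.List.len feature_groups).toNat) 1).foldl
    (fun combos mask =>
      combos.insert ("FS_" ++ PySem.Str.join "_" (pvGroupsA feature_groups mask))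
        (pvGroupsA feature_groups mask))
    (PySem.Dict.empty : PySem.Dict String (List String))).items

-- ===== PORT B =====
-- literal port of Source B: grow the powerset (subsets = subsets + [sub+[g] for sub in subsets]), then fill the dict skipping the empty subset
def generate_feature_set_combinations_alt (feature_groups : List String) : List (String × List String) :=
  ((feature_groups.foldl (fun subs g => subs ++ subs.map (fun sub => sub ++ [g])) [[]]).foldl
    (fun d sub => if sub.isEmpty then d else d.insert ("FS_" ++ PySem.Str.join "_" sub) sub)
    (PySem.Dict.empty : PySem.Dict String (List String))).items

-- ===== PRECONDITION & SPEC =====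
def Spec_generate_feature_set_combinations (feature_groups : List String) (out : List (String × List String)) : Prop := out = generate_feature_set_combinations_alt feature_groups
instance (feature_groups : List String) (out : List (String × List String)) : Decidable (Spec_generate_feature_set_combinations feature_groups out) := by unfold Spec_generate_feature_set_combinations; infer_instance

-- ===== CLAIM (what is proved, stated in full; the proofs are below) =====
def Claim_equal_generate_feature_set_combinations : Prop := ∀ (feature_groups : List String), Dom_generate_feature_set_combinations feature_groups → Spec_generate_feature_set_combinations feature_groups (generate_feature_set_combinations feature_groups)

-- ===== LEMMAS AND PROOFS =====

-- the subset of xs selected by the bits of m (bit i ↔ position i)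
def pvSel : List String → Nat → List String
  | [], _ => []
  | x :: t, m => (if m % 2 = 1 then [x] else []) ++ pvSel t (m / 2)

-- the dict-insertion step both programs perform for a nonempty subset
def pvIns (d : PySem.Dict String (List String)) (s : List String) : PySem.Dict String (List String) :=
  d.insert ("FS_" ++ PySem.Str.join "_" s) s

theorem pvSel_zero (xs : List String) : pvSel xs 0 = [] := by
  induction xs with
  | nil => rfl
  | cons x t ih => simp [pvSel, ih]

theorem pvSel_ne_nil (xs : List String) (m : Nat) (h1 : 0 < m) (h2 : m < 2 ^ xs.length) :
    pvSel xs m ≠ [] := by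
  induction xs generalizing m with
  | nil => simp at h2; omega
  | cons x t ih =>
    simp only [pvSel]
    by_cases hm : m % 2 = 1
    · simp [hm]
    · have h3 : 0 < m / 2 := by omega
      have h4 : m / 2 < 2 ^ t.length := by
        simp only [List.length_cons, pow_succ] at h2; omega
      simp [hm, ih (m / 2) h3 h4]

theorem pvSel_append_lt (xs : List String) (g : String) (m : Nat) (h : m < 2 ^ xs.length) :
    pvSel (xs ++ [g]) m = pvSel xs m := by
  induction xs generalizing m with
  | nil =>
    simp only [List.length_nil, pow_zero, Nat.lt_one_iff] at h
    subst h; simpa using pvSel_zero [g]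
  | cons x t ih =>
    simp only [List.cons_append, pvSel]
    rw [ih (m / 2) (by simp only [List.length_cons, pow_succ] at h; omega)]

theorem pvSel_append_add (xs : List String) (g : String) (m : Nat) (h : m < 2 ^ xs.length) :
    pvSel (xs ++ [g]) (2 ^ xs.length + m) = pvSel xs m ++ [g] := by
  induction xs generalizing m with
  | nil =>
    simp only [List.length_nil, pow_zero, Nat.lt_one_iff] at h
    subst h; rfl
  | cons x t ih =>
    have hlen : (x :: t).length = t.length + 1 := rfl
    simp only [List.cons_append, pvSel, hlen]
    have h1 : (2 ^ (t.length + 1) + m) % 2 = m % 2 := by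
      rw [pow_succ]; omega
    have h2 : (2 ^ (t.length + 1) + m) / 2 = 2 ^ t.length + m / 2 := by
      rw [pow_succ]; omega
    rw [h1, h2, ih (m / 2) (by simp only [List.length_cons, pow_succ] at h; omega)]
    simp

-- A's inner comprehension, in clean Nat form, computes pvSel
theorem pvInner_nat (xs : List String) (m : Nat) (acc : List String) :
    (List.range xs.length).foldl
      (fun acc k => if (m >>> k) &&& 1 = 1 then acc ++ [xs.getD k ""] else acc) acc
    = acc ++ pvSel xs m := by
  induction xs generalizing m acc with
  | nil => simp [pvSel]
  | cons x t ih =>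
    rw [List.length_cons, List.range_succ_eq_map, List.foldl_cons, List.foldl_map]
    have hb : (m >>> 0) &&& 1 = m % 2 := by simp [Nat.and_one_is_mod]
    have hs : ∀ k, (m >>> (k + 1)) &&& 1 = ((m / 2) >>> k) &&& 1 := by
      intro k; rw [Nat.shiftRight_succ_inside]
    have : ((List.range t.length).foldl
        (fun acc k => if (m >>> (k + 1)) &&& 1 = 1 then acc ++ [(x :: t).getD (k + 1) ""] else acc)
        (if (m >>> 0) &&& 1 = 1 then acc ++ [(x :: t).getD 0 ""] else acc))
        = ((List.range t.length).foldl
        (fun acc k => if ((m / 2) >>> k) &&& 1 = 1 then acc ++ [t.getD k ""] else acc)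
        (if m % 2 = 1 then acc ++ [x] else acc)) := by
      rw [hb]
      apply PySem.List.foldl_congr_mem
      intro a k _
      rw [hs]; rfl
    rw [this, ih]
    by_cases hm : m % 2 = 1 <;> simp [pvSel, hm]

-- A's inner loop computes pvSel (mask nonnegative, given as a Nat cast)
theorem pvInner_eq (xs : List String) (m : Nat) :
    pvGroupsA xs ((m : Nat) : Int) = pvSel xs m := by
  unfold pvGroupsA
  rw [PySem.List.pyRange_one, List.foldl_map]
  have hn : ((PySem.List.len xs - 0).toNat) = xs.length := by
    simp [PySem.List.len_eq]
  rw [hn]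
  refine (PySem.List.foldl_congr_mem _ _
      (fun acc k => if (m >>> k) &&& 1 = 1 then acc ++ [xs.getD k ""] else acc) _ ?_).trans
    (by simpa using pvInner_nat xs m [])
  intro acc k _
  have h5 : ((m : Int)) >>> ((k : Nat) : Int) = ((m >>> k : Nat) : Int) := by simp
  have h6 : PySem.Int.band ((m >>> k : Nat) : Int) 1 = (((m >>> k) &&& 1 : Nat) : Int) := by
    exact_mod_cast PySem.Int.band_natCast (m >>> k) 1
  have h7 : ((((m >>> k) &&& 1 : Nat) : Int) = 1) ↔ (((m >>> k) &&& 1 : Nat) = 1) := by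
    exact_mod_cast Iff.rfl
  simp only [Int.zero_add, Int.toNat_natCast, h5, h6, h7, PySem.List.pyGetD_natCast,
    List.getD_eq_getElem?_getD]

-- bitmask order IS incremental-powerset order
theorem pvPows_eq (xs : List String) :
    (List.range (2 ^ xs.length)).map (pvSel xs)
    = xs.foldl (fun subs g => subs ++ subs.map (fun sub => sub ++ [g])) [[]] := by
  induction xs using List.reverseRecOn with
  | nil => rfl
  | append_singleton t g ih =>
    rw [List.foldl_append, List.foldl_cons, List.foldl_nil, ← ih]
    have hlen : (t ++ [g]).length = t.length + 1 := by simp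
    rw [hlen, pow_succ, Nat.mul_two, List.range_add, List.map_append, List.map_map, List.map_map]
    congr 1
    · apply List.map_congr_left
      intro m hm
      exact pvSel_append_lt t g m (List.mem_range.mp hm)
    · apply List.map_congr_left
      intro m hm
      exact pvSel_append_add t g m (List.mem_range.mp hm)

-- skipping the empty subset is a no-op on a list of nonempty subsets
theorem pvSkip_fold (subs : List (List String)) (d : PySem.Dict String (List String))
    (h : ∀ s ∈ subs, s ≠ []) :
    subs.foldl (fun d sub =>
      if sub.isEmpty then d else d.insert ("FS_" ++ PySem.Str.join "_" sub) sub) d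
    = subs.foldl pvIns d := by
  apply PySem.List.foldl_congr_mem
  intro acc s hs
  have : s.isEmpty = false := by simpa using h s hs
  simp [this, pvIns]

-- the common canonical fold both programs reduce to
def pvCore (xs : List String) : PySem.Dict String (List String) :=
  (List.range (2 ^ xs.length - 1)).foldl (fun d k => pvIns d (pvSel xs (k + 1))) PySem.Dict.empty

theorem pvA_eq (xs : List String) :
    generate_feature_set_combinations xs = (pvCore xs).items := by
  unfold generate_feature_set_combinations pvCore
  congr 1
  rw [PySem.List.foldl_congr_mem _ _
      (fun (d : PySem.Dict String (List String)) (mask : Int) => pvIns d (pvSel xs mask.toNat)) _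
      (by
        intro d mask hmem
        obtain ⟨hlo, _⟩ := PySem.List.mem_pyRange_one.mp hmem
        have hm : mask = ((mask.toNat : Nat) : Int) := (Int.toNat_of_nonneg (by omega)).symm
        rw [hm]
        simp only [pvInner_eq, pvIns, Int.toNat_natCast])]
  have hb : (2 : Int) ^ (PySem.List.len xs).toNat = ((2 ^ xs.length : Nat) : Int) := by
    simp [PySem.List.len_eq]
  rw [hb, PySem.List.pyRange_one, List.foldl_map]
  have hc : (((2 ^ xs.length : Nat) : Int) - 1).toNat = 2 ^ xs.length - 1 := by omega
  rw [hc]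
  apply PySem.List.foldl_congr_mem
  intro d k _
  have hk : (1 + (k : Int)).toNat = k + 1 := by omega
  rw [hk]

theorem pvB_eq (xs : List String) :
    generate_feature_set_combinations_alt xs = (pvCore xs).items := by
  unfold generate_feature_set_combinations_alt pvCore
  congr 1
  rw [← pvPows_eq]
  have h1 : 2 ^ xs.length = (2 ^ xs.length - 1) + 1 :=
    (Nat.succ_pred_eq_of_pos (Nat.two_pow_pos _)).symm
  conv_lhs => rw [h1]
  rw [List.range_succ_eq_map, List.map_cons, List.foldl_cons, List.map_map, pvSel_zero]
  simp only [List.isEmpty_nil, if_true]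
  have hne : ∀ s ∈ List.map (pvSel xs ∘ Nat.succ) (List.range (2 ^ xs.length - 1)), s ≠ [] := by
    intro s hs
    obtain ⟨k, hk, rfl⟩ := List.mem_map.mp hs
    have hk' := List.mem_range.mp hk
    exact pvSel_ne_nil xs (k + 1) (by omega) (by omega)
  rw [pvSkip_fold _ _ hne, List.foldl_map]
  rfl

-- ===== VERDICT (by name: the statement is the Claim_ definition above) =====
theorem generate_feature_set_combinations_spec : Claim_equal_generate_feature_set_combinations := by
  intro xs _
  unfold Spec_generate_feature_set_combinations
  rw [pvA_eq, pvB_eq]
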